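-- pv_equiv track=rewrite | github.com/pizzasteve111/TareaTDA | backtracking.py | calcular_celdas_iluminadas
-- ===== SOURCE A (Python) =====
-- def calcular_celdas_iluminadas(faro, filas, columnas):
--     direcciones = [(dx, dy) for dx in range(-2, 3) for dy in range(-2, 3)]
--     iluminadas = set()
--     x, y = faro
--     for dx, dy in direcciones:
--         nx, ny = x + dx, y + dy
--         if 0 <= nx < filas and 0 <= ny < columnas:
--             iluminadas.add((nx, ny))
--     return iluminadas
-- ===== SOURCE B (Python) =====
-- def calcular_celdas_iluminadas(faro, filas, columnas):
--     x, y = faro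
--     x_lo, x_hi = max(0, x - 2), min(filas, x + 3)
--     y_lo, y_hi = max(0, y - 2), min(columnas, y + 3)
--     iluminadas = set()
--     for nx in range(x_lo, x_hi):
--         for ny in range(y_lo, y_hi):
--             iluminadas.add((nx, ny))
--     return iluminadas
-- ===== Notes on version B (the rewrite author's own statement) =====
-- stated objective: simpler
-- what changed: B clamps the neighborhood rectangle to the grid up front (max/min on the range bounds) and adds every cell of the clamped ranges unconditionally, instead of A's scan over 25 fixed offsets with a per-cell bounds test.
import Mathlib
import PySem

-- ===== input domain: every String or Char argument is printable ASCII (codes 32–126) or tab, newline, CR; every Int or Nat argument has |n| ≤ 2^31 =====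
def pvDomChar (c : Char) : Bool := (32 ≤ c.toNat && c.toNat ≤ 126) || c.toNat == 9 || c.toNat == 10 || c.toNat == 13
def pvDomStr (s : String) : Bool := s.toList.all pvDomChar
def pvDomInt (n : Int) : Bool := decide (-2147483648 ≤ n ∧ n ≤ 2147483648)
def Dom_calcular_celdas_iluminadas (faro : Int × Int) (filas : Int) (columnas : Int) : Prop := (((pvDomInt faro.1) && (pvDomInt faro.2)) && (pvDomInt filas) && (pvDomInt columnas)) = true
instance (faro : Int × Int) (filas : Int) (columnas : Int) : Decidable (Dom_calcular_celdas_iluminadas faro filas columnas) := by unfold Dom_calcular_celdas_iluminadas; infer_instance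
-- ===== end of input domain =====

-- B clamps the neighborhood's coordinate ranges to the grid up front and adds every cell
-- unconditionally, instead of A's scan over 25 fixed offsets with a per-cell bounds test (simpler).

-- ===== PORT A =====
def calcular_celdas_iluminadas (faro : Int × Int) (filas : Int) (columnas : Int) : List (Int × Int) :=
  let direcciones : List (Int × Int) :=
    (PySem.List.pyRange (-2) 3 1).flatMap (fun dx => (PySem.List.pyRange (-2) 3 1).map (fun dy => (dx, dy)))
  let x := faro.1
  let y := faro.2
  direcciones.foldl (fun iluminadas d =>
    let nx := x + d.1
    let ny := y + d.2
    if 0 ≤ nx ∧ nx < filas ∧ 0 ≤ ny ∧ ny < columnas then PySem.Set.add iluminadas (nx, ny)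
    else iluminadas) PySem.Set.empty

-- ===== PORT B =====
def calcular_celdas_iluminadas_alt (faro : Int × Int) (filas : Int) (columnas : Int) : List (Int × Int) :=
  let x := faro.1
  let y := faro.2
  let x_lo := max 0 (x - 2)
  let x_hi := min filas (x + 3)
  let y_lo := max 0 (y - 2)
  let y_hi := min columnas (y + 3)
  (PySem.List.pyRange x_lo x_hi 1).foldl (fun iluminadas nx =>
    (PySem.List.pyRange y_lo y_hi 1).foldl (fun iluminadas ny =>
      PySem.Set.add iluminadas (nx, ny)) iluminadas) PySem.Set.empty

-- ===== PRECONDITION & SPEC =====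
def Spec_calcular_celdas_iluminadas (faro : Int × Int) (filas : Int) (columnas : Int) (out : List (Int × Int)) : Prop := out = calcular_celdas_iluminadas_alt faro filas columnas
instance (faro : Int × Int) (filas : Int) (columnas : Int) (out : List (Int × Int)) : Decidable (Spec_calcular_celdas_iluminadas faro filas columnas out) := by unfold Spec_calcular_celdas_iluminadas; infer_instance

-- ===== CLAIM (what is proved, stated in full; the proofs are below) =====
def Claim_equal_calcular_celdas_iluminadas : Prop := ∀ (faro : Int × Int) (filas : Int) (columnas : Int), Dom_calcular_celdas_iluminadas faro filas columnas → Spec_calcular_celdas_iluminadas faro filas columnas (calcular_celdas_iluminadas faro filas columnas)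

-- ===== LEMMAS AND PROOFS =====

theorem pyRange_nil {u v : Int} (h : v ≤ u) : PySem.List.pyRange u v 1 = [] := by
  simp [PySem.List.pyRange_one, show (v - u).toNat = 0 by omega]

-- A clamped range is the filtered unclamped range.
theorem pyRange_clamp (c d b : Int) : ∀ (n : Nat) (a : Int), (b - a).toNat ≤ n →
    PySem.List.pyRange (max c a) (min d b) 1 =
      (PySem.List.pyRange a b 1).filter (fun x => decide (c ≤ x) && decide (x < d)) := by
  intro n
  induction n with
  | zero =>
    intro a h
    rw [pyRange_nil (show min d b ≤ max c a by omega), pyRange_nil (show b ≤ a by omega)]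
    simp
  | succ n ih =>
    intro a h
    by_cases hab : a < b
    · rw [PySem.List.pyRange_one_cons hab, List.filter_cons]
      by_cases hc : c ≤ a
      · by_cases hd2 : a < d
        · rw [show max c a = a by omega]
          rw [PySem.List.pyRange_one_cons (show a < min d b by omega)]
          simp only [hc, hd2, decide_true, Bool.and_self, if_true]
          rw [← ih (a + 1) (by omega), show max c (a + 1) = a + 1 by omega]
        · rw [pyRange_nil (show min d b ≤ max c a by omega),
              ← ih (a + 1) (by omega), pyRange_nil (show min d b ≤ max c (a + 1) by omega)]
          simp [hd2]
      · rw [← ih (a + 1) (by omega), show max c a = max c (a + 1) by omega]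
        simp [hc]
    · rw [pyRange_nil (show min d b ≤ max c a by omega), pyRange_nil (show b ≤ a by omega)]
      simp

-- The 5-cell window as an explicit list.
theorem pyRange_window (a : Int) :
    PySem.List.pyRange (a - 2) (a + 3) 1 = [a + -2, a + -1, a + 0, a + 1, a + 2] := by
  rw [PySem.List.pyRange_one, show (a + 3 - (a - 2)).toNat = 5 by omega]
  simp [List.range_succ]
  omega

-- A's conditional-add loop over pairwise-distinct candidates builds the filtered candidate list.
theorem foldl_cond_add (x y filas columnas : Int) : ∀ (L : List (Int × Int)) (s : List (Int × Int)),
    (L.map (fun d => (x + d.1, y + d.2))).Nodup →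
    (∀ d ∈ L, (x + d.1, y + d.2) ∉ s) →
    L.foldl (fun il d =>
        if 0 ≤ x + d.1 ∧ x + d.1 < filas ∧ 0 ≤ y + d.2 ∧ y + d.2 < columnas then
          PySem.Set.add il (x + d.1, y + d.2) else il) s
      = s ++ (L.map (fun d => (x + d.1, y + d.2))).filter
          (fun p => (decide (0 ≤ p.1) && decide (p.1 < filas)) && (decide (0 ≤ p.2) && decide (p.2 < columnas))) := by
  intro L
  induction L with
  | nil => intro s _ _; simp
  | cons d L ih =>
    intro s hn hd
    simp only [List.map_cons, List.nodup_cons, List.mem_map] at hn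
    simp only [List.foldl_cons]
    by_cases hcond : 0 ≤ x + d.1 ∧ x + d.1 < filas ∧ 0 ≤ y + d.2 ∧ y + d.2 < columnas
    · rw [if_pos hcond, PySem.Set.add_of_not_mem (hd d (List.mem_cons_self))]
      rw [ih (s ++ [(x + d.1, y + d.2)]) hn.2 ?_]
      · have : ((decide (0 ≤ x + d.1) && decide (x + d.1 < filas)) && (decide (0 ≤ y + d.2) &&
            decide (y + d.2 < columnas))) = true := by
          simp [hcond.1, hcond.2.1, hcond.2.2.1, hcond.2.2.2]
        simp [this]
      · intro e he hmem
        rcases List.mem_append.1 hmem with h1 | h2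
        · exact hd e (List.mem_cons_of_mem _ he) h1
        · exact hn.1 ⟨e, he, by simpa using h2⟩
    · rw [if_neg hcond]
      rw [ih s hn.2 (fun e he => hd e (List.mem_cons_of_mem _ he))]
      have : ((decide (0 ≤ x + d.1) && decide (x + d.1 < filas)) && (decide (0 ≤ y + d.2) &&
          decide (y + d.2 < columnas))) = false := by
        rcases (by tauto : ¬ (0 ≤ x + d.1) ∨ ¬ (x + d.1 < filas) ∨ ¬ (0 ≤ y + d.2) ∨ ¬ (y + d.2 < columnas)) with h|h|h|h <;> simp [h]
      simp [this]

-- B's nested unconditional-add loops build the row-major product list.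
theorem foldl_rows : ∀ (xs : List Int) (ys : List Int) (s : List (Int × Int)),
    xs.Nodup → ys.Nodup → (∀ p ∈ s, p.1 ∉ xs) →
    xs.foldl (fun il nx => ys.foldl (fun il ny => PySem.Set.add il (nx, ny)) il) s
      = s ++ xs.flatMap (fun nx => ys.map (fun ny => (nx, ny))) := by
  intro xs
  induction xs with
  | nil => intro ys s _ _ _; simp
  | cons nx xs ih =>
    intro ys s hxs hys hd
    simp only [List.foldl_cons, List.flatMap_cons]
    rw [← PySem.Set.update_map_eq_foldl_add,
        PySem.Set.update_eq_append_of_disjoint s _ (hys.map (fun a b h => by simpa using h)) ?_]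
    · rw [ih ys _ hxs.of_cons hys ?_, List.append_assoc]
      intro p hp
      rcases List.mem_append.1 hp with h1 | h2
      · intro hmem
        exact hd p h1 (List.mem_cons_of_mem _ hmem)
      · rcases List.mem_map.1 h2 with ⟨ny, _, rfl⟩
        simpa using (List.nodup_cons.1 hxs).1
    · intro p hp
      rcases List.mem_map.1 hp with ⟨ny, _, rfl⟩
      intro hmem
      exact hd (nx, ny) hmem (List.mem_cons_self)

-- Filtering a product list componentwise = product of the filtered lists.
theorem filter_prod (P Q : Int → Bool) : ∀ (xs : List Int) (ys : List Int),
    (xs.flatMap (fun nx => ys.map (fun ny => (nx, ny)))).filter (fun p => P p.1 && Q p.2)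
      = (xs.filter P).flatMap (fun nx => (ys.filter Q).map (fun ny => (nx, ny))) := by
  intro xs ys
  induction xs with
  | nil => simp
  | cons nx xs ih =>
    simp only [List.flatMap_cons, List.filter_append, List.filter_cons, ih]
    by_cases h : P nx
    · simp only [h]
      rw [List.filter_map]
      simp only [Function.comp_def, h, Bool.true_and]
      simp [List.flatMap_cons]
    · have : (ys.map (fun ny => (nx, ny))).filter (fun p => P p.1 && Q p.2) = [] := by
        rw [List.filter_eq_nil_iff]
        intro p hp
        rcases List.mem_map.1 hp with ⟨ny, _, rfl⟩
        simp [h]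
      simp [this, h]

-- ===== VERDICT (by name: the statement is the Claim_ definition above) =====
theorem calcular_celdas_iluminadas_spec : Claim_equal_calcular_celdas_iluminadas := by
  intro faro filas columnas _
  obtain ⟨x, y⟩ := faro
  unfold Spec_calcular_celdas_iluminadas calcular_celdas_iluminadas calcular_celdas_iluminadas_alt
  -- evaluate the concrete offset list
  rw [show (PySem.List.pyRange (-2) 3 1).flatMap
        (fun dx => (PySem.List.pyRange (-2) 3 1).map (fun dy => (dx, dy))) =
        ([(-2, -2), (-2, -1), (-2, 0), (-2, 1), (-2, 2),
          (-1, -2), (-1, -1), (-1, 0), (-1, 1), (-1, 2),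
          (0, -2), (0, -1), (0, 0), (0, 1), (0, 2),
          (1, -2), (1, -1), (1, 0), (1, 1), (1, 2),
          (2, -2), (2, -1), (2, 0), (2, 1), (2, 2)] : List (Int × Int)) from by decide]
  have hinj : Function.Injective (fun d : Int × Int => (x + d.1, y + d.2)) := by
    intro a b hab
    simp only [Prod.ext_iff] at hab ⊢
    omega
  rw [foldl_cond_add x y filas columnas _ PySem.Set.empty
        ((by decide : ([(-2, -2), (-2, -1), (-2, 0), (-2, 1), (-2, 2),
          (-1, -2), (-1, -1), (-1, 0), (-1, 1), (-1, 2),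
          (0, -2), (0, -1), (0, 0), (0, 1), (0, 2),
          (1, -2), (1, -1), (1, 0), (1, 1), (1, 2),
          (2, -2), (2, -1), (2, 0), (2, 1), (2, 2)] : List (Int × Int)).Nodup).map hinj)
        (by intro d _ h; simp [PySem.Set.empty] at h)]
  rw [foldl_rows _ _ PySem.Set.empty (PySem.List.nodup_pyRange_one _ _) (PySem.List.nodup_pyRange_one _ _)
        (by intro p h; simp [PySem.Set.empty] at h)]
  rw [pyRange_clamp 0 filas (x + 3) 5 (x - 2) (by omega),
      pyRange_clamp 0 columnas (y + 3) 5 (y - 2) (by omega),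
      pyRange_window x, pyRange_window y]
  rw [← filter_prod (fun n => decide (0 ≤ n) && decide (n < filas))
        (fun n => decide (0 ≤ n) && decide (n < columnas))
        [x + -2, x + -1, x + 0, x + 1, x + 2] [y + -2, y + -1, y + 0, y + 1, y + 2]]
  rfl
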